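-- pv_equiv track=rewrite | github.com/palvalab/RS-Gen | stats_functions.py | prox_cluster_1D
-- ===== SOURCE A (Python) =====
-- def prox_cluster_1D(sigs):
--     N_obs = len(sigs)
--     clusters = []
--     c = 0
--     for i in range(N_obs):
--         if sigs[i]:
--             if len(clusters)==0:
--                 clusters.append([i])
--             elif (i-1 in clusters[c]):
--                 clusters[c].append(i)
--             else:
--                 c += 1
--                 clusters.append([i])
--     return clusters
-- ===== SOURCE B (Python) =====
-- def prox_cluster_1D(sigs):
--     # Run-extent scan: at each truthy position scan forward to the end of the
--     # maximal truthy block and emit the whole cluster at once as list(range(i, j)).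
--     n = len(sigs)
--     out = []
--     i = 0
--     while i < n:
--         if sigs[i]:
--             j = i + 1
--             while j < n and sigs[j]:
--                 j += 1
--             out.append(list(range(i, j)))
--             i = j
--         else:
--             i += 1
--     return out
-- ===== Notes on version B (the rewrite author's own statement) =====
-- stated objective: alternative
-- what changed: Replaces A's element-at-a-time state machine (cluster counter c, membership test 'i-1 in clusters[c]', per-element appends into the current cluster) by a run-extent scan: an inner loop finds the end j of each maximal truthy block and the whole cluster is emitted at once as list(range(i, j)).
import Mathlib
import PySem

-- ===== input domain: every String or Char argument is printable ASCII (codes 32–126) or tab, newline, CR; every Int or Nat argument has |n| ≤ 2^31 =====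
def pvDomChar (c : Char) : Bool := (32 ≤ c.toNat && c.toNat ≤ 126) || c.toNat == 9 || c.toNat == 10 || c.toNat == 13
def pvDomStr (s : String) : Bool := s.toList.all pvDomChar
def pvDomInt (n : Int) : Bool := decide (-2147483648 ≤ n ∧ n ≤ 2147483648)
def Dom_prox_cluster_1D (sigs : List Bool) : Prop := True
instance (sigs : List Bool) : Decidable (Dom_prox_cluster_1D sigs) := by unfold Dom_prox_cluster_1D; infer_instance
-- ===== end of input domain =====

-- B replaces A's element-at-a-time state machine (counter + membership test +
-- per-element cluster appends) by a run-extent scan emitting each maximal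
-- truthy block wholesale as range(i, j); objective: alternative.

-- ===== PORT A =====
-- clusters[c].append(i): positional update at index c (always in range when run)
def pvAppendAt (cs : List (List Int)) (c : Int) (i : Int) : List (List Int) :=
  match cs with
  | [] => []
  | r :: rest => if c == 0 then (r ++ [i]) :: rest else r :: pvAppendAt rest (c - 1) i

-- loop body of A; clusters[c] read via pyGetD (c is always in range when read)
def pvStepA (sigs : List Bool) (st : List (List Int) × Int) (i : Int) :
    List (List Int) × Int :=
  if PySem.List.pyGetD sigs i false then
    if st.1.length == 0 then (st.1 ++ [[i]], st.2)
    else if (i - 1) ∈ PySem.List.pyGetD st.1 st.2 [] then (pvAppendAt st.1 st.2 i, st.2)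
    else (st.1 ++ [[i]], st.2 + 1)
  else st

def prox_cluster_1D (sigs : List Bool) : List (List Int) :=
  ((PySem.List.pyRange 0 (PySem.List.len sigs) 1).foldl (pvStepA sigs) ([], 0)).1

-- ===== PORT B =====
-- inner while loop 'while j < n and sigs[j]: j += 1', totalized by a fuel that
-- is exactly the loop bound n - j (structural recursion on the fuel)
def pvScanGo (sigs : List Bool) (n : Int) : Nat → Int → Int
  | 0, j => j
  | fuel + 1, j =>
    if j < n ∧ PySem.List.pyGetD sigs j false = true then pvScanGo sigs n fuel (j + 1) else j

def pvScanRun (sigs : List Bool) (n j : Int) : Int := pvScanGo sigs n (n - j).toNat j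

-- outer while loop of B, state (i, out); fuel = loop bound n - i (i grows by at
-- least 1 per iteration, so the fuel never runs out on the calls below)
def pvGoBGo (sigs : List Bool) (n : Int) : Nat → Int → List (List Int) → List (List Int)
  | 0, _, out => out
  | fuel + 1, i, out =>
    if i < n then
      if PySem.List.pyGetD sigs i false = true then
        pvGoBGo sigs n fuel (pvScanRun sigs n (i + 1))
          (out ++ [PySem.List.pyRange i (pvScanRun sigs n (i + 1)) 1])
      else pvGoBGo sigs n fuel (i + 1) out
    else out

def prox_cluster_1D_alt (sigs : List Bool) : List (List Int) :=
  pvGoBGo sigs (PySem.List.len sigs) (PySem.List.len sigs).toNat 0 []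

-- ===== PRECONDITION & SPEC =====
def Spec_prox_cluster_1D (sigs : List Bool) (out : List (List Int)) : Prop := out = prox_cluster_1D_alt sigs
instance (sigs : List Bool) (out : List (List Int)) : Decidable (Spec_prox_cluster_1D sigs out) := by unfold Spec_prox_cluster_1D; infer_instance

-- ===== CLAIM (what is proved, stated in full; the proofs are below) =====
def Claim_equal_prox_cluster_1D : Prop := ∀ (sigs : List Bool), Dom_prox_cluster_1D sigs → Spec_prox_cluster_1D sigs (prox_cluster_1D sigs)

-- ===== LEMMAS AND PROOFS =====

-- reading / updating the last cluster of out₀ ++ [r] at index out₀.length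
lemma pvGetD_concat (out₀ : List (List Int)) (r : List Int) :
    PySem.List.pyGetD (out₀ ++ [r]) (out₀.length : Int) [] = r := by
  rw [PySem.List.pyGetD_natCast]
  simp

lemma pvAppendAt_concat (out₀ : List (List Int)) (r : List Int) (x : Int) :
    pvAppendAt (out₀ ++ [r]) (out₀.length : Int) x = out₀ ++ [r ++ [x]] := by
  induction out₀ with
  | nil => simp [pvAppendAt]
  | cons a t ih =>
    rw [List.cons_append, pvAppendAt, if_neg (by simp; omega)]
    have h : ((a :: t).length : Int) - 1 = (t.length : Int) := by simp
    rw [h, ih]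
    simp

-- the inner scan only moves j forward
lemma pvScanGo_ge (sigs : List Bool) (n : Int) :
    ∀ (fuel : Nat) (j : Int), j ≤ pvScanGo sigs n fuel j := by
  intro fuel
  induction fuel with
  | zero => intro j; exact le_refl j
  | succ f ih =>
    intro j
    rw [pvScanGo]
    split
    · exact le_trans (by omega) (ih (j + 1))
    · exact le_refl j

lemma pvScanRun_ge (sigs : List Bool) (n j : Int) : j ≤ pvScanRun sigs n j :=
  pvScanGo_ge sigs n _ j

-- one-step unfolding of the inner while loop
lemma pvScanRun_step (sigs : List Bool) (n j : Int) :
    pvScanRun sigs n j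
      = if j < n ∧ PySem.List.pyGetD sigs j false = true then pvScanRun sigs n (j + 1) else j := by
  unfold pvScanRun
  by_cases h : j < n ∧ PySem.List.pyGetD sigs j false = true
  · have h0 : (n - j).toNat = (n - (j + 1)).toNat + 1 := by omega
    rw [h0, pvScanGo, if_pos h]
  · rcases e : (n - j).toNat with _ | m
    · rw [pvScanGo, if_neg h]
    · rw [pvScanGo, if_neg h, if_neg h]

-- the fuel is irrelevant as long as it covers the loop bound
lemma pvGoBGo_fuel (sigs : List Bool) (n : Int) :
    ∀ (f₁ f₂ : Nat) (i : Int) (out : List (List Int)),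
      (n - i).toNat ≤ f₁ → (n - i).toNat ≤ f₂ →
      pvGoBGo sigs n f₁ i out = pvGoBGo sigs n f₂ i out := by
  intro f₁
  induction f₁ with
  | zero =>
    intro f₂ i out h1 h2
    have hin : ¬ i < n := by omega
    rcases f₂ with _ | g
    · rfl
    · rw [pvGoBGo, pvGoBGo, if_neg hin]
  | succ f ih =>
    intro f₂ i out h1 h2
    rcases f₂ with _ | g
    · have hin : ¬ i < n := by omega
      rw [pvGoBGo, pvGoBGo, if_neg hin]
    · rw [pvGoBGo, pvGoBGo]
      by_cases hin : i < n
      · rw [if_pos hin, if_pos hin]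
        by_cases hs : PySem.List.pyGetD sigs i false = true
        · rw [if_pos hs, if_pos hs]
          have hsc := pvScanRun_ge sigs n (i + 1)
          exact ih g _ _ (by omega) (by omega)
        · rw [if_neg hs, if_neg hs]
          exact ih g _ _ (by omega) (by omega)
      · rw [if_neg hin, if_neg hin]

-- proof-side view of B's outer loop with the canonical fuel
def pvGoB (sigs : List Bool) (n i : Int) (out : List (List Int)) : List (List Int) :=
  pvGoBGo sigs n (n - i).toNat i out

-- one-step unfolding of the outer while loop
lemma pvGoB_step (sigs : List Bool) (n i : Int) (out : List (List Int)) :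
    pvGoB sigs n i out
      = if i < n then
          if PySem.List.pyGetD sigs i false = true then
            pvGoB sigs n (pvScanRun sigs n (i + 1))
              (out ++ [PySem.List.pyRange i (pvScanRun sigs n (i + 1)) 1])
          else pvGoB sigs n (i + 1) out
        else out := by
  unfold pvGoB
  by_cases hin : i < n
  · have h0 : (n - i).toNat = (n - (i + 1)).toNat + 1 := by omega
    rw [h0, pvGoBGo, if_pos hin, if_pos hin]
    by_cases hs : PySem.List.pyGetD sigs i false = true
    · rw [if_pos hs, if_pos hs]
      have hsc := pvScanRun_ge sigs n (i + 1)
      exact pvGoBGo_fuel sigs n _ _ _ _ (by omega) (by omega)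
    · rw [if_neg hs, if_neg hs]
  · rcases e : (n - i).toNat with _ | m
    · rw [pvGoBGo, if_neg hin]
    · rw [pvGoBGo, if_neg hin, if_neg hin]

-- A's "at a run boundary" invariant: clusters is either empty (with c = 0) or
-- out₀ ++ [r] with c = |out₀| and every element of the last cluster ≤ i - 2
def pvInvH (i : Int) (out : List (List Int)) (c : Int) : Prop :=
  (out = [] ∧ c = 0) ∨
  (∃ out₀ r, out = out₀ ++ [r] ∧ c = (out₀.length : Int) ∧ ∀ x ∈ r, x ≤ i - 2)

-- the main correspondence: A's remaining fold from index i equals B's outer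
-- loop (at a boundary, pvInvH) resp. B's inner run scan (mid-run)
lemma pvMain (sigs : List Bool) (n : Int) (m : Nat) :
    ∀ i : Int, (n - i).toNat = m →
      ((∀ out c, pvInvH i out c →
          ((PySem.List.pyRange i n 1).foldl (pvStepA sigs) (out, c)).1 = pvGoB sigs n i out) ∧
       (∀ out₀ r, (i - 1) ∈ r → (∀ x ∈ r, x ≤ i - 1) →
          ((PySem.List.pyRange i n 1).foldl (pvStepA sigs) (out₀ ++ [r], (out₀.length : Int))).1
            = pvGoB sigs n (pvScanRun sigs n i)
                (out₀ ++ [r ++ PySem.List.pyRange i (pvScanRun sigs n i) 1]))) := by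
  induction m using Nat.strong_induction_on with
  | _ m ih =>
    intro i hm
    constructor
    · -- boundary statement H(i)
      intro out c hInv
      by_cases hin : i < n
      · have hmeas : (n - (i + 1)).toNat < m := by omega
        rw [PySem.List.pyRange_one_cons hin, List.foldl_cons]
        by_cases hsig : PySem.List.pyGetD sigs i false = true
        · -- truthy: A opens a new cluster [[i]]; B scans the whole run
          have hstep : pvStepA sigs (out, c) i = (out ++ [[i]], (out.length : Int)) := by
            rcases hInv with ⟨h1, h2⟩ | ⟨out₀, r, h1, h2, h3⟩
            · subst h1; subst h2; simp [pvStepA, hsig]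
            · have hnm : (i - 1) ∉ r := fun hmem => by have := h3 _ hmem; omega
              subst h1; subst h2
              simp [pvStepA, hsig, hnm]
          rw [hstep]
          have hL := (ih _ hmeas (i + 1) (by omega)).2 out [i]
            (by simp) (by simp)
          rw [hL]
          have hscan := pvScanRun_ge sigs n (i + 1)
          have hrange : PySem.List.pyRange i (pvScanRun sigs n (i + 1)) 1
              = i :: PySem.List.pyRange (i + 1) (pvScanRun sigs n (i + 1)) 1 :=
            PySem.List.pyRange_one_cons (by omega)
          conv_rhs => rw [pvGoB_step]
          rw [if_pos hin, if_pos hsig, hrange]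
          simp
        · -- falsy: both skip index i
          have hstep : pvStepA sigs (out, c) i = (out, c) := by
            simp [pvStepA, hsig]
          rw [hstep]
          have hInv' : pvInvH (i + 1) out c := by
            rcases hInv with ⟨h1, h2⟩ | ⟨out₀, r, h1, h2, h3⟩
            · exact Or.inl ⟨h1, h2⟩
            · exact Or.inr ⟨out₀, r, h1, h2, fun x hx => by have := h3 x hx; omega⟩
          rw [(ih _ hmeas (i + 1) (by omega)).1 out c hInv']
          conv_rhs => rw [pvGoB_step]
          rw [if_pos hin, if_neg hsig]
      · rw [PySem.List.pyRange_one_eq_nil (by omega), List.foldl_nil]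
        conv_rhs => rw [pvGoB_step]
        rw [if_neg hin]
    · -- mid-run statement L(i): the last cluster r ends at i - 1
      intro out₀ r hmem hle
      by_cases hrun : i < n ∧ PySem.List.pyGetD sigs i false = true
      · -- run continues at i
        have hmeas : (n - (i + 1)).toNat < m := by omega
        rw [PySem.List.pyRange_one_cons hrun.1, List.foldl_cons]
        have hstep : pvStepA sigs (out₀ ++ [r], (out₀.length : Int)) i
            = (out₀ ++ [r ++ [i]], (out₀.length : Int)) := by
          have hget := pvGetD_concat out₀ r
          simp only [pvStepA, hrun.2, if_pos, hget, if_pos hmem]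
          rw [if_neg (by simp), pvAppendAt_concat]
        rw [hstep]
        have hL := (ih _ hmeas (i + 1) (by omega)).2 out₀ (r ++ [i])
          (by simp) (by intro x hx; rcases List.mem_append.mp hx with h | h
                        · have := hle x h; omega
                        · simp at h; omega)
        rw [hL]
        have hscan := pvScanRun_ge sigs n (i + 1)
        have hsc : pvScanRun sigs n i = pvScanRun sigs n (i + 1) := by
          rw [pvScanRun_step, if_pos hrun]
        rw [hsc]
        have hrange : PySem.List.pyRange i (pvScanRun sigs n (i + 1)) 1
            = i :: PySem.List.pyRange (i + 1) (pvScanRun sigs n (i + 1)) 1 :=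
          PySem.List.pyRange_one_cons (by omega)
        rw [hrange]
        simp
      · -- run ends at i (i ≥ n, or sigs[i] falsy)
        have hsc : pvScanRun sigs n i = i := by
          rw [pvScanRun_step, if_neg hrun]
        rw [hsc, PySem.List.pyRange_one_eq_nil (le_refl i), List.append_nil]
        by_cases hin : i < n
        · have hsig : ¬ PySem.List.pyGetD sigs i false = true := fun h => hrun ⟨hin, h⟩
          have hmeas : (n - (i + 1)).toNat < m := by omega
          rw [PySem.List.pyRange_one_cons hin, List.foldl_cons]
          have hstep : pvStepA sigs (out₀ ++ [r], (out₀.length : Int)) i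
              = (out₀ ++ [r], (out₀.length : Int)) := by
            simp [pvStepA, hsig]
          rw [hstep]
          have hInv' : pvInvH (i + 1) (out₀ ++ [r]) (out₀.length : Int) :=
            Or.inr ⟨out₀, r, rfl, rfl, fun x hx => by have := hle x hx; omega⟩
          rw [(ih _ hmeas (i + 1) (by omega)).1 _ _ hInv']
          conv_rhs => rw [pvGoB_step]
          rw [if_pos hin, if_neg hsig]
        · rw [PySem.List.pyRange_one_eq_nil (by omega), List.foldl_nil]
          conv_rhs => rw [pvGoB_step]
          rw [if_neg hin]

-- ===== VERDICT (by name: the statement is the Claim_ definition above) =====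
theorem prox_cluster_1D_spec : Claim_equal_prox_cluster_1D := by
  intro sigs _
  show prox_cluster_1D sigs = prox_cluster_1D_alt sigs
  unfold prox_cluster_1D prox_cluster_1D_alt
  have h := (pvMain sigs (PySem.List.len sigs) _ 0 rfl).1 [] 0 (Or.inl ⟨rfl, rfl⟩)
  rw [h]
  unfold pvGoB
  norm_num
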